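-- pv_equiv track=rewrite | github.com/cplab/sapinet_regularization | src/utils/math/__init__.py | k_bits
-- ===== SOURCE A (Python) =====
-- import itertools
--
-- def k_bits(n, k):
--     """Generate all binary integers of length 'n' with exactly 'k' 1-bits."""
--     result = []
--
--     for bits in itertools.combinations(range(n), k):
--         s = ["0"] * n
--         for bit in bits:
--             s[bit] = "1"
--         result.append("".join(s))
--
--     return result
-- ===== SOURCE B (Python) =====
-- def k_bits(n, k):
--     """Generate all binary integers of length 'n' with exactly 'k' 1-bits."""
--     out = []
--     stack = [("", n, k)]
--     while stack:
--         prefix, rem, ones = stack.pop()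
--         if rem <= 0:
--             if ones == 0:
--                 out.append(prefix)
--             continue
--         if rem < ones:
--             continue
--         stack.append((prefix + "0", rem - 1, ones))
--         if ones > 0:
--             stack.append((prefix + "1", rem - 1, ones - 1))
--     return out
-- ===== Notes on version B (the rewrite author's own statement) =====
-- stated objective: alternative
-- what changed: Replaces the itertools.combinations-over-index-sets construction (build a zero array per combination and overwrite the chosen positions) by an explicit-stack depth-first search that extends the string left-to-right, trying '1' (when ones remain) before '0', which emits the same lexicographic order.
import Mathlib
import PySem

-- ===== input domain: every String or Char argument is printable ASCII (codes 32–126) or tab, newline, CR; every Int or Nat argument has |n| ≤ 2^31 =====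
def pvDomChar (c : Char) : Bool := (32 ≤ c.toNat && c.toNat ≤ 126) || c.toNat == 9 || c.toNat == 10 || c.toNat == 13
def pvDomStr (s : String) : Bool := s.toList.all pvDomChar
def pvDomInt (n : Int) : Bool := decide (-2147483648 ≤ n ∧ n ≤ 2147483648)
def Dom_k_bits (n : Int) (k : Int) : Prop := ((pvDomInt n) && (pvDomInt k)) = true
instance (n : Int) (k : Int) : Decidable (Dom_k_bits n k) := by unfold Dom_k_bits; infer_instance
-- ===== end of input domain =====

-- B replaces the itertools.combinations-of-index-sets construction by an explicit-stack
-- DFS that builds each string left-to-right ('1' before '0'); objective: alternative.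

-- ===== PORT A =====
-- itertools.combinations(xs, k) in its lexicographic emission order
-- (including its documented 'if r > n: return' short-circuit).
def pvCombos {α : Type} (xs : List α) (k : Nat) : List (List α) :=
  if xs.length < k then []
  else
    match k, xs with
    | 0, _ => [[]]
    | _ + 1, [] => []
    | k + 1, x :: rest => (pvCombos rest k).map (fun c => x :: c) ++ pvCombos rest (k + 1)

-- Python's one-character strings "0"/"1" in the working list s are ported as Char,
-- so "".join(s) is String.ofList (exact on this domain).  bits come from range(n),
-- hence are nonnegative and bit.toNat is exact; k < 0 (where A raises ValueError)
-- is outside Pre_.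
def k_bits (n : Int) (k : Int) : List String :=
  (pvCombos (PySem.List.pyRange 0 n 1) k.toNat).map (fun bits =>
    String.ofList (bits.foldl (fun s bit => s.set bit.toNat '1') (List.replicate n.toNat '0')))

-- ===== PORT B =====
def pvPush (prefix_ : String) (rem ones : Int) : List (String × Int × Int) :=
  if 0 < ones then [(prefix_ ++ "1", rem - 1, ones - 1)] else []

def pvLoop (stack : List (String × Int × Int)) (out : List String) : List String :=
  match stack with
  | [] => out
  | (prefix_, rem, ones) :: st =>
    if rem ≤ 0 then pvLoop st (if ones = 0 then out ++ [prefix_] else out)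
    else if rem < ones then pvLoop st out
    else pvLoop (pvPush prefix_ rem ones ++ (prefix_ ++ "0", rem - 1, ones) :: st) out
termination_by (stack.map (fun e => 3 ^ e.2.1.toNat)).sum
decreasing_by
  · simp only [List.map_cons, List.sum_cons]
    have h1 : 1 ≤ 3 ^ rem.toNat := Nat.one_le_pow _ _ (by omega)
    omega
  · simp only [List.map_cons, List.sum_cons]
    have h1 : 1 ≤ 3 ^ rem.toNat := Nat.one_le_pow _ _ (by omega)
    omega
  · simp only [pvPush]
    have h3 : 3 ^ rem.toNat = 3 ^ ((rem - 1).toNat) * 3 := by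
      rw [show rem.toNat = ((rem - 1).toNat) + 1 from by omega, pow_succ]
    have h1 : 1 ≤ 3 ^ ((rem - 1).toNat) := Nat.one_le_pow _ _ (by omega)
    split_ifs
    all_goals simp only [List.map_cons, List.map_append, List.map_nil, List.sum_cons,
      List.sum_append, List.sum_nil, List.nil_append]
    all_goals rw [h3]
    all_goals omega

def k_bits_alt (n : Int) (k : Int) : List String := pvLoop [("", n, k)] []

-- ===== PRECONDITION & SPEC =====
-- Pre_ excludes k < 0, on which A raises ValueError (from itertools.combinations).
def Pre_k_bits (n : Int) (k : Int) : Prop := 0 ≤ k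
instance (n : Int) (k : Int) : Decidable (Pre_k_bits n k) := by unfold Pre_k_bits; infer_instance
def pvWitness_k_bits : Int × Int := (4, 2)

def Spec_k_bits (n : Int) (k : Int) (out : List String) : Prop := out = k_bits_alt n k
instance (n : Int) (k : Int) (out : List String) : Decidable (Spec_k_bits n k out) := by unfold Spec_k_bits; infer_instance

-- ===== CLAIM (what is proved, stated in full; the proofs are below) =====
def Claim_equal_k_bits : Prop := ∀ (n : Int) (k : Int), Dom_k_bits n k → Pre_k_bits n k → Spec_k_bits n k (k_bits n k)

-- ===== LEMMAS AND PROOFS =====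

theorem pvCombos_eq_nil {α : Type} (xs : List α) (k : Nat) (h : xs.length < k) :
    pvCombos xs k = [] := by
  unfold pvCombos
  rw [if_pos h]

theorem pvCombos_cons_succ {α : Type} (x : α) (rest : List α) (k : Nat) :
    pvCombos (x :: rest) (k + 1)
      = (pvCombos rest k).map (fun c => x :: c) ++ pvCombos rest (k + 1) := by
  by_cases h : (x :: rest).length < k + 1
  · have h1 : rest.length < k := by simp at h; omega
    rw [pvCombos_eq_nil _ _ h, pvCombos_eq_nil rest k h1,
        pvCombos_eq_nil rest (k + 1) (by omega)]
    rfl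
  · conv_lhs => unfold pvCombos
    rw [if_neg h]

-- canonical char-level generator: strings of length m with exactly k ones, '1' branch first
def pvGen : Nat → Nat → List (List Char)
  | 0, 0 => [[]]
  | 0, _ + 1 => []
  | m + 1, 0 => (pvGen m 0).map (fun c => '0' :: c)
  | m + 1, k + 1 => (pvGen m k).map (fun c => '1' :: c) ++ (pvGen m (k + 1)).map (fun c => '0' :: c)

theorem pvGen_nil : ∀ (m k : Nat), m < k → pvGen m k = [] := by
  intro m
  induction m with
  | zero => intro k h; cases k with
    | zero => omega
    | succ k => rfl
  | succ m ih =>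
    intro k h
    cases k with
    | zero => omega
    | succ k => simp [pvGen, ih k (by omega), ih (k+1) (by omega)]

theorem pvCombos_map {α β : Type} (f : α → β) : ∀ (xs : List α) (k : Nat),
    pvCombos (xs.map f) k = (pvCombos xs k).map (List.map f) := by
  intro xs
  induction xs with
  | nil => intro k; cases k <;> rfl
  | cons x rest ih =>
    intro k
    cases k with
    | zero => rfl
    | succ k =>
      rw [List.map_cons, pvCombos_cons_succ, pvCombos_cons_succ, ih k, ih (k+1)]
      simp [List.map_map, Function.comp_def]

theorem pv_foldl_set_shift : ∀ (bits : List Nat) (c : Char) (l : List Char),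
    (bits.map Nat.succ).foldl (fun s b => s.set b '1') (c :: l)
      = c :: bits.foldl (fun s b => s.set b '1') l := by
  intro bits
  induction bits with
  | nil => intro c l; rfl
  | cons b bs ih => intro c l; simp [List.foldl_cons, List.set, ih]

theorem pv_main : ∀ (n k : Nat),
    (pvCombos (List.range n) k).map
        (fun bits => bits.foldl (fun s b => s.set b '1') (List.replicate n '0'))
      = pvGen n k := by
  intro n
  induction n with
  | zero => intro k; cases k <;> rfl
  | succ n ih =>
    intro k
    rw [List.range_succ_eq_map]
    cases k with
    | zero =>
      have h0 := ih 0
      rw [show pvGen (n+1) 0 = (pvGen n 0).map (fun c => '0' :: c) from rfl, ← h0]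
      simp [pvCombos, List.replicate_succ]
    | succ k =>
      have hsh : ∀ (c : Char) (bits : List Nat),
          (bits.map Nat.succ).foldl (fun s b => s.set b '1') (c :: List.replicate n '0')
            = c :: bits.foldl (fun s b => s.set b '1') (List.replicate n '0') :=
        fun c bits => pv_foldl_set_shift bits c _
      rw [pvCombos_cons_succ]
      rw [pvCombos_map, pvCombos_map]
      rw [List.map_append]
      simp only [List.map_map, Function.comp_def]
      have e1 : ∀ bits : List Nat,
          (0 :: bits.map Nat.succ).foldl (fun s b => s.set b '1') (List.replicate (n+1) '0')
            = '1' :: bits.foldl (fun s b => s.set b '1') (List.replicate n '0') := by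
        intro bits
        rw [List.replicate_succ, List.foldl_cons]
        exact hsh '1' bits
      have e2 : ∀ bits : List Nat,
          (bits.map Nat.succ).foldl (fun s b => s.set b '1') (List.replicate (n+1) '0')
            = '0' :: bits.foldl (fun s b => s.set b '1') (List.replicate n '0') := by
        intro bits
        rw [List.replicate_succ]
        exact hsh '0' bits
      rw [show pvGen (n+1) (k+1)
            = (pvGen n k).map (fun c => '1' :: c) ++ (pvGen n (k+1)).map (fun c => '0' :: c)
          from rfl]
      rw [← ih k, ← ih (k+1)]
      simp only [List.map_map, Function.comp_def, e1, e2]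

theorem pv_str_pre_one (p : String) (l : List Char) :
    (p ++ "1") ++ String.ofList l = p ++ String.ofList ('1' :: l) := by
  rw [String.ext_iff]; simp

theorem pv_str_pre_zero (p : String) (l : List Char) :
    (p ++ "0") ++ String.ofList l = p ++ String.ofList ('0' :: l) := by
  rw [String.ext_iff]; simp

-- the strings a stack entry will eventually contribute, in emission order
def pvE (e : String × Int × Int) : List String :=
  if e.2.2 < 0 then []
  else (pvGen e.2.1.toNat e.2.2.toNat).map (fun l => e.1 ++ String.ofList l)

theorem pvE_base (p : String) (rem ones : Int) (h0 : rem ≤ 0) :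
    pvE (p, rem, ones) = if ones = 0 then [p] else [] := by
  unfold pvE
  simp only
  have hr : rem.toNat = 0 := by omega
  rw [hr]
  rcases lt_trichotomy ones 0 with hneg | hz | hpos
  · rw [if_pos hneg, if_neg (by omega)]
  · rw [hz]
    simp [pvGen]
  · rw [if_neg (by omega), if_neg (by omega)]
    rw [show ones.toNat = (ones.toNat - 1) + 1 from by omega]
    rfl

theorem pvE_dead (p : String) (rem ones : Int) (h0 : ¬ rem ≤ 0) (h1 : rem < ones) :
    pvE (p, rem, ones) = [] := by
  unfold pvE
  simp only
  rcases lt_trichotomy ones 0 with hneg | hz | hpos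
  · rw [if_pos hneg]
  · omega
  · rw [if_neg (by omega), pvGen_nil rem.toNat ones.toNat (by omega)]
    rfl

theorem pvE_step (p : String) (rem ones : Int) (h0 : ¬ rem ≤ 0) :
    pvE (p, rem, ones)
      = (if 0 < ones then pvE (p ++ "1", rem - 1, ones - 1) else [])
        ++ pvE (p ++ "0", rem - 1, ones) := by
  unfold pvE
  simp only
  have hrm : rem.toNat = (rem - 1).toNat + 1 := by omega
  rcases lt_trichotomy ones 0 with hneg | hz | hpos
  · rw [if_pos hneg, if_neg (by omega), if_pos hneg]
    rfl
  · subst hz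
    rw [if_neg (by omega), if_neg (by omega), if_neg (by omega)]
    rw [hrm]
    rw [show pvGen ((rem - 1).toNat + 1) (0 : Int).toNat
          = (pvGen ((rem - 1).toNat) 0).map (fun c => '0' :: c) from rfl]
    simp only [List.map_map, Function.comp_def, pv_str_pre_zero, List.nil_append,
      Int.toNat_zero]
  · rw [if_neg (by omega), if_pos hpos, if_neg (by omega), if_neg (by omega)]
    rw [hrm, show ones.toNat = (ones - 1).toNat + 1 from by omega]
    rw [show pvGen ((rem - 1).toNat + 1) ((ones - 1).toNat + 1)
          = (pvGen ((rem - 1).toNat) ((ones - 1).toNat)).map (fun c => '1' :: c)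
            ++ (pvGen ((rem - 1).toNat) ((ones - 1).toNat + 1)).map (fun c => '0' :: c)
        from rfl]
    simp only [List.map_append, List.map_map, Function.comp_def, pv_str_pre_one,
      pv_str_pre_zero]

theorem pvLoop_eq : ∀ (stack : List (String × Int × Int)) (out : List String),
    pvLoop stack out = out ++ stack.flatMap pvE := by
  intro stack out
  induction stack, out using pvLoop.induct with
  | case1 out => simp [pvLoop]
  | case2 out prefix_ rem ones st h0 ih =>
    rw [pvLoop, if_pos h0, List.flatMap_cons, pvE_base prefix_ rem ones h0]
    split_ifs with h <;> simp [h] at ih <;> simp [ih]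
  | case3 out prefix_ rem ones st h0 h1 ih =>
    rw [pvLoop, if_neg h0, if_pos h1, ih, List.flatMap_cons,
        pvE_dead prefix_ rem ones h0 h1]
    simp
  | case4 out prefix_ rem ones st h0 h1 ih =>
    rw [pvLoop, if_neg h0, if_neg h1, ih, List.flatMap_cons,
        pvE_step prefix_ rem ones h0]
    unfold pvPush
    split_ifs <;> simp

theorem k_bits_eq_gen (n k : Int) :
    k_bits n k = (pvGen n.toNat k.toNat).map String.ofList := by
  unfold k_bits
  have hr : PySem.List.pyRange 0 n 1 = (List.range n.toNat).map (fun j : Nat => (j : Int)) := by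
    rw [PySem.List.pyRange_one]
    have h0 : (n - 0).toNat = n.toNat := by omega
    rw [h0]
    exact List.map_congr_left (fun j _ => by omega)
  rw [hr, pvCombos_map, List.map_map]
  rw [← pv_main n.toNat k.toNat, List.map_map]
  apply List.map_congr_left
  intro bits _
  simp only [Function.comp_apply]
  congr 1
  rw [List.foldl_map]
  simp only [Int.toNat_natCast]

-- ===== VERDICT (by name: the statement is the Claim_ definition above) =====
theorem k_bits_spec : Claim_equal_k_bits := by
  intro n k _ hk
  unfold Spec_k_bits k_bits_alt
  rw [k_bits_eq_gen n k, pvLoop_eq]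
  have hE : pvE ("", n, k) = (pvGen n.toNat k.toNat).map String.ofList := by
    unfold pvE
    simp only
    rw [if_neg (by unfold Pre_k_bits at hk; omega)]
    exact List.map_congr_left (fun l _ => by rw [String.ext_iff]; simp)
  simp [hE]
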